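-- pv_equiv track=rewrite | github.com/GioeleBuriani/advent_of_code | 2024/day13/solution.py | find_best_price
-- ===== SOURCE A (Python) =====
-- def find_best_price(combos):
--
--     if not combos:
--         return 0
--
--     prices = []
--
--     for combo in combos:
--         price = combo[0] * 3 + combo[1]
--         prices.append(price)
--
--     return min(prices)
-- ===== SOURCE B (Python) =====
-- def find_best_price(combos):
--     ordered = sorted(x * 3 + y for x, y in combos)
--     return ordered[0] if ordered else 0
-- ===== Notes on version B (the rewrite author's own statement) =====
-- stated objective: alternative
-- what changed: Replaces the empty-guard, the appending loop and min() with a sort of the price list followed by taking its first element (0 when empty).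
import Mathlib
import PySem

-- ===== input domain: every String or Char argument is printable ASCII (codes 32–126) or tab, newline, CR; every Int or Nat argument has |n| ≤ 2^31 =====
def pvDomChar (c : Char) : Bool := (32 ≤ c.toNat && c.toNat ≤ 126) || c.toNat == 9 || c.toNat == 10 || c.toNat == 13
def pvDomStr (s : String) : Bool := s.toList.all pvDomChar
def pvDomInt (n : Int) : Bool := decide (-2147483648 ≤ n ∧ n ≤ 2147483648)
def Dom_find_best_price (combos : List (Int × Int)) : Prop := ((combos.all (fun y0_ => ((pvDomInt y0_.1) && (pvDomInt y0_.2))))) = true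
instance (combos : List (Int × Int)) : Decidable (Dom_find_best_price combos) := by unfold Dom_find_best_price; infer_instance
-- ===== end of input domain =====

-- B sorts the price list and takes its first element instead of the guard + appending loop + min(); same values, different algorithm.
-- ===== PORT A =====
-- Port A: guard on empty, build the prices list by appending, then min().
def find_best_price (combos : List (Int × Int)) : Int :=
  if combos = [] then 0
  else
    let prices := combos.foldl (fun acc combo => acc ++ [combo.1 * 3 + combo.2]) []
    (PySem.List.min? prices (fun x => x)).getD 0

-- ===== PORT B =====
-- Port B: sort the price list ascending, return its head (0 when empty).
def find_best_price_alt (combos : List (Int × Int)) : Int :=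
  let ordered := PySem.List.sorted (combos.map (fun c => c.1 * 3 + c.2)) (fun x => x) false
  match ordered with
  | [] => 0
  | h :: _ => h

-- ===== PRECONDITION & SPEC =====
def Spec_find_best_price (combos : List (Int × Int)) (out : Int) : Prop := out = find_best_price_alt combos
instance (combos : List (Int × Int)) (out : Int) : Decidable (Spec_find_best_price combos out) := by unfold Spec_find_best_price; infer_instance

-- ===== CLAIM (what is proved, stated in full; the proofs are below) =====
def Claim_equal_find_best_price : Prop := ∀ (combos : List (Int × Int)), Dom_find_best_price combos → Spec_find_best_price combos (find_best_price combos)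

-- ===== LEMMAS AND PROOFS =====
-- A's appending loop builds the map of the price function over combos.
theorem fbp_build_map (combos : List (Int × Int)) (acc : List Int) :
    combos.foldl (fun acc combo => acc ++ [combo.1 * 3 + combo.2]) acc
      = acc ++ combos.map (fun c => c.1 * 3 + c.2) := by
  induction combos generalizing acc with
  | nil => simp
  | cons h t ih => simp [List.foldl, ih]

theorem fbp_fmin_mem (t : List Int) (x : Int) : t.foldl min x ∈ x :: t := by
  induction t generalizing x with
  | nil => simp
  | cons h t ih =>
      simp only [List.foldl]
      rcases List.mem_cons.mp (ih (min x h)) with he | hm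
      · rw [he]
        rcases le_total x h with hxh | hxh
        · simp [min_eq_left hxh]
        · simp [min_eq_right hxh]
      · simp [hm]

theorem fbp_fmin_le (t : List Int) (x : Int) : ∀ y ∈ x :: t, t.foldl min x ≤ y := by
  induction t generalizing x with
  | nil => simp
  | cons h t ih =>
      intro y hy
      simp only [List.foldl]
      simp only [List.mem_cons] at hy
      have hself : min x h ∈ min x h :: t := List.mem_cons_self ..
      rcases hy with h1 | h1 | h1
      · rw [h1]; exact le_trans (ih (min x h) _ hself) (min_le_left x h)
      · rw [h1]; exact le_trans (ih (min x h) _ hself) (min_le_right x h)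
      · exact ih (min x h) y (List.mem_cons_of_mem _ h1)

-- ===== VERDICT (by name: the statement is the Claim_ definition above) =====
theorem find_best_price_spec : Claim_equal_find_best_price := by
  intro combos _
  unfold Spec_find_best_price find_best_price find_best_price_alt
  cases combos with
  | nil => rfl
  | cons c t =>
      simp only [reduceCtorEq, if_false, fbp_build_map, List.nil_append, List.map_cons]
      set ps : List Int := (c.1 * 3 + c.2) :: t.map (fun x => x.1 * 3 + x.2) with hps
      have hnil : PySem.List.sorted ps (fun x => x) false ≠ [] := by
        intro h
        rw [PySem.List.sorted_eq_nil_iff] at h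
        simp [hps] at h
      obtain ⟨m, r, hsr⟩ := List.exists_cons_of_ne_nil hnil
      have hmem : m ∈ ps := by
        have : m ∈ PySem.List.sorted ps (fun x => x) false := by rw [hsr]; exact List.mem_cons_self
        rwa [PySem.List.mem_sorted] at this
      have hle : ∀ y ∈ ps, m ≤ y := PySem.List.key_head_sorted_le ps (fun x => x) hsr
      rw [hsr]
      have hmin : PySem.List.min? ps (fun x => x) = some ((t.map (fun x => x.1 * 3 + x.2)).foldl min (c.1 * 3 + c.2)) := by
        rw [hps]; exact PySem.List.min?_id_cons ..
      rw [hmin, Option.getD_some]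
      have h1 : (t.map (fun x => x.1 * 3 + x.2)).foldl min (c.1 * 3 + c.2) ≤ m :=
        fbp_fmin_le _ _ m hmem
      have h2 : m ≤ (t.map (fun x => x.1 * 3 + x.2)).foldl min (c.1 * 3 + c.2) :=
        hle _ (fbp_fmin_mem _ _)
      exact le_antisymm h1 h2
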